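-- pv_equiv track=rewrite | github.com/gnazareths/cs162 | session2_2/mersenne.py | initialize_generator
-- ===== SOURCE A (Python) =====
-- bitmask_1 = (2**32) - 1  # To get last 32 bits
--
-- def initialize_generator(seed):
--     "Initialize the generator from a seed"
--     # Create a length 624 list to store the state of the generator
--     MT = [0 for i in range(624)]
--     index = 0
--     MT[0] = seed
--     for i in range(1, 624):
--         MT[i] = ((1812433253 * MT[i - 1]) ^ (
--             (MT[i - 1] >> 30) + i)) & bitmask_1
--     return (MT, index)
-- ===== SOURCE B (Python) =====
-- bitmask_1 = (2**32) - 1  # To get last 32 bits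
--
-- def initialize_generator(seed):
--     "Initialize the generator from a seed"
--     # Top-down memoized recursion: the state at index i is defined as a pure
--     # function of the state at index i-1; the array is the image of that
--     # function over range(624) rather than a buffer mutated in place.
--     memo = {0: seed}
--
--     def state(i):
--         if i not in memo:
--             prev = state(i - 1)
--             memo[i] = ((1812433253 * prev) ^ ((prev >> 30) + i)) & bitmask_1
--         return memo[i]
--
--     return ([state(i) for i in range(624)], 0)
-- ===== Notes on version B (the rewrite author's own statement) =====
-- stated objective: alternative
-- what changed: Replaces A's bottom-up in-place mutation of a preallocated 624-entry array (reading MT[i-1] back out of the array each iteration) with a top-down memoized recursive definition of the state at index i, the result list being that function mapped over range(624).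
import Mathlib
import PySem

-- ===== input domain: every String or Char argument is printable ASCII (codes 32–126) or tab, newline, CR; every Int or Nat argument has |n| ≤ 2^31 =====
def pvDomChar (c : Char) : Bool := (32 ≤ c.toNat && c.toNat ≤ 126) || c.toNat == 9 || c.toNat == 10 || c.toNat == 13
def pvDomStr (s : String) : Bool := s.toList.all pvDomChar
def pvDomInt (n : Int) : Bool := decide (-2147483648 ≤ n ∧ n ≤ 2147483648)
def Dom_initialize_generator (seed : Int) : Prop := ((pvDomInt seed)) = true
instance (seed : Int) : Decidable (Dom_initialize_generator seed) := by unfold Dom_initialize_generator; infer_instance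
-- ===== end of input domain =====

-- B replaces A's index-mutated preallocated array with a top-down recursive
-- definition of the state at each index, mapped over the index range
-- (objective: alternative decomposition, same cost).

-- The Mersenne-Twister recurrence expression, written identically in Source A and Source B:
-- ((1812433253 * prev) ^ ((prev >> 30) + i)) & bitmask_1
def pvStep (prev i : Int) : Int :=
  PySem.Int.band (PySem.Int.bxor (1812433253 * prev) ((prev >>> (30 : Nat)) + i)) 4294967295

-- ===== PORT A =====
-- All indices used by A are statically in range (1 ≤ i < 624 over a 624-list),
-- so MT[i] = v is List.set and the read MT[i-1] is getD (exact there).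
def initialize_generator (seed : Int) : List Int × Int :=
  let MT : List Int := List.replicate 624 0   -- [0 for i in range(624)]
  let index : Int := 0
  let MT := MT.set 0 seed
  let MT := (PySem.List.pyRange 1 624 1).foldl
    (fun mt i => mt.set i.toNat (pvStep (mt.getD (i - 1).toNat 0) i)) MT
  (MT, index)

-- ===== PORT B =====
-- Source B's recursive state function (the memo dict only avoids recomputation;
-- the value returned is this recursion), mapped over range(624).
def pvState (seed : Int) : Nat → Int
  | 0 => seed
  | i + 1 => pvStep (pvState seed i) ((i : Int) + 1)

def initialize_generator_alt (seed : Int) : List Int × Int :=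
  ((List.range 624).map (pvState seed), 0)

-- ===== PRECONDITION & SPEC =====
def Spec_initialize_generator (seed : Int) (out : List Int × Int) : Prop := out = initialize_generator_alt seed
instance (seed : Int) (out : List Int × Int) : Decidable (Spec_initialize_generator seed out) := by unfold Spec_initialize_generator; infer_instance

-- ===== CLAIM (what is proved, stated in full; the proofs are below) =====
def Claim_equal_initialize_generator : Prop := ∀ (seed : Int), Dom_initialize_generator seed → Spec_initialize_generator seed (initialize_generator seed)

-- ===== LEMMAS AND PROOFS =====

-- index list 1, 2, …, m as Ints
def pvIdxs (m : Nat) : List Int := (List.range m).map (fun k => (1 : Int) + k)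

theorem pvIdxs_succ (m : Nat) : pvIdxs (m + 1) = pvIdxs m ++ [(1 : Int) + m] := by
  simp [pvIdxs, List.range_succ]

-- the fold A performs over indices 1..m, starting from the array with MT[0] = seed
def pvAFold (seed : Int) (l : List Int) : List Int :=
  l.foldl (fun mt i => mt.set i.toNat (pvStep (mt.getD (i - 1).toNat 0) i))
    ((List.replicate 624 (0 : Int)).set 0 seed)

set_option maxRecDepth 4096 in
theorem pvInvariant (seed : Int) (m : Nat) (hm : m ≤ 623) :
    pvAFold seed (pvIdxs m) = (List.range (m + 1)).map (pvState seed) ++ List.replicate (623 - m) 0 := by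
  induction m with
  | zero =>
      show pvAFold seed (pvIdxs 0) = _
      rfl
  | succ m ih =>
      have hm' : m ≤ 623 := Nat.le_of_succ_le hm
      have hpad : 623 - m = (623 - (m + 1)) + 1 := by omega
      have hlen : ((List.range (m + 1)).map (pvState seed)).length = m + 1 := by simp
      rw [pvIdxs_succ]
      unfold pvAFold
      rw [List.foldl_append]
      have := ih hm'
      unfold pvAFold at this
      rw [this]
      have hi : ((1 : Int) + m).toNat = m + 1 := by omega
      have hi' : ((1 : Int) + m - 1).toNat = m := by omega
      simp only [List.foldl_cons, List.foldl_nil, hi, hi']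
      -- the read: getD at index m hits the last element of the built prefix
      have hread : ((List.range (m + 1)).map (pvState seed) ++ List.replicate (623 - m) 0).getD m 0
          = pvState seed m := by
        have hlt : m < ((List.range (m + 1)).map (pvState seed)).length := by omega
        rw [List.getD_eq_getElem?_getD, List.getElem?_append_left hlt]
        simp
      rw [hread]
      -- the write: set at index m+1 = length of prefix replaces the first padding 0
      rw [hpad, List.replicate_succ]
      have hset : ∀ (P : List Int) (pad : List Int) (v : Int),
          (P ++ (0 : Int) :: pad).set P.length v = P ++ v :: pad := by
        intro P pad v
        induction P with
        | nil => rfl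
        | cons a P ihP => simp [ihP]
      have := hset ((List.range (m + 1)).map (pvState seed)) (List.replicate (623 - (m + 1)) 0)
        (pvStep (pvState seed m) (1 + m))
      rw [hlen] at this
      rw [this, List.range_succ, List.map_append]
      have hst : pvStep (pvState seed m) (1 + ↑m) = pvState seed (m + 1) := by
        simp [pvState]; ring_nf
      simp [hst, List.range_succ]

set_option maxRecDepth 8192 in
theorem pvRange_eq : PySem.List.pyRange 1 624 1 = pvIdxs 623 := by
  rw [PySem.List.pyRange_one]
  rfl

-- ===== VERDICT (by name: the statement is the Claim_ definition above) =====
theorem initialize_generator_spec : Claim_equal_initialize_generator := by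
  intro seed _
  show initialize_generator seed = initialize_generator_alt seed
  have h := pvInvariant seed 623 (le_refl 623)
  simp only [Nat.sub_self, List.replicate_zero, List.append_nil] at h
  simp only [initialize_generator, initialize_generator_alt, pvRange_eq]
  exact congrArg (fun l => (l, (0 : Int))) h
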